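-- pv_equiv track=rewrite | github.com/dewittn/qbasic-90s-time-capsule | my-programs/math-helpers/MATH2.py | find_factor_pair
-- ===== SOURCE A (Python) =====
-- def find_factor_pair(middle_coef: int, constant: int) -> tuple[int, int] | None:
--     """
--     Find two numbers that multiply to give the constant term
--     and add to give the middle coefficient.
--
--     For x² + bx + c, finds m and n where:
--     - m * n = c (constant term)
--     - m + n = b (middle coefficient)
--
--     Returns (m, n) if found, None if unfactorable.
--     """
--     if constant == 0:
--         return None
--
--     # Determine the search range based on the sign of the constant
--     if constant > 0:
--         # Both factors have the same sign
--         if middle_coef > 0: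
--             # Both positive
--             for m in range(1, abs(constant) + 1):
--                 for n in range(1, abs(constant) + 1):
--                     if m * n == constant and m + n == middle_coef:
--                         return (m, n)
--         else:
--             # Both negative
--             for m in range(1, abs(constant) + 1):
--                 for n in range(1, abs(constant) + 1):
--                     if m * n == constant and -m + -n == middle_coef:
--                         return (-m, -n)
--     else:
--         # constant < 0: factors have opposite signs
--         if middle_coef > 0:
--             # Larger factor is positive
--             for m in range(1, abs(constant) + 1):
--                 for n in range(1, abs(constant) + 1):
--                     if m * -n == constant and m + -n == middle_coef:
--                         return (m, -n)
--         else: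
--             # Larger factor is negative
--             for m in range(1, abs(constant) + 1):
--                 for n in range(1, abs(constant) + 1):
--                     if -m * n == constant and -m + n == middle_coef:
--                         return (-m, n)
--
--     return None
-- ===== SOURCE B (Python) =====
-- def find_factor_pair(middle_coef: int, constant: int) -> tuple[int, int] | None:
--     """Single O(|c|) pass: derive the partner factor from the sum equation
--     instead of scanning for it with an inner loop."""
--     if constant == 0:
--         return None
--     C = abs(constant)
--     B = abs(middle_coef)
--     for m in range(1, C + 1):
--         n = (B - m) if constant > 0 else (m - B)
--         if n >= 1 and m * n == C:
--             sm = 1 if middle_coef > 0 else -1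
--             sn = sm if constant > 0 else -sm
--             return (sm * m, sn * n)
--     return None
-- ===== Notes on version B (the rewrite author's own statement) =====
-- stated objective: faster
-- what changed: Replaced A's four nested brute-force double loops over all (m, n) pairs with a single loop over m that derives the unique partner n from the sum equation and checks the product, with the four sign cases folded into two sign factors.
import Mathlib
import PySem

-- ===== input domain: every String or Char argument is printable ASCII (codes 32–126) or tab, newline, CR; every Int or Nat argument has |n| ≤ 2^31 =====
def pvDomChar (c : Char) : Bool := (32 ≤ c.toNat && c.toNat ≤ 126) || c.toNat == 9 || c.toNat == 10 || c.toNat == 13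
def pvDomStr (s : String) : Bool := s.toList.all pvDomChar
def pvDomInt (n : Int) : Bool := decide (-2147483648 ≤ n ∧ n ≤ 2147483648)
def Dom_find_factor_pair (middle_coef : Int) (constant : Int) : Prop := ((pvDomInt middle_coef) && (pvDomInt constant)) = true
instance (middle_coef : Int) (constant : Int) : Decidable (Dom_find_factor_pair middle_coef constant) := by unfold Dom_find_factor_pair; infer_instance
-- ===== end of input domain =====

-- B replaces A's nested quadratic scan by one pass over m that derives the partner
-- factor n from the sum equation and checks the product (objective: faster).

-- ===== PORT A =====
-- for-loop with early return: scan the list, return the first `some`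
def ffpScan (xs : List Int) (f : Int → Option (Int × Int)) : Option (Int × Int) :=
  match xs with
  | [] => none
  | x :: rest =>
    match f x with
    | some r => some r
    | none => ffpScan rest f

def find_factor_pair (middle_coef : Int) (constant : Int) : Option (Int × Int) :=
  if constant == 0 then none
  else if constant > 0 then
    if middle_coef > 0 then
      ffpScan (PySem.List.pyRange 1 (|constant| + 1) 1) (fun m =>
        ffpScan (PySem.List.pyRange 1 (|constant| + 1) 1) (fun n =>
          if m * n == constant && m + n == middle_coef then some (m, n) else none))
    else
      ffpScan (PySem.List.pyRange 1 (|constant| + 1) 1) (fun m =>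
        ffpScan (PySem.List.pyRange 1 (|constant| + 1) 1) (fun n =>
          if m * n == constant && -m + -n == middle_coef then some (-m, -n) else none))
  else
    if middle_coef > 0 then
      ffpScan (PySem.List.pyRange 1 (|constant| + 1) 1) (fun m =>
        ffpScan (PySem.List.pyRange 1 (|constant| + 1) 1) (fun n =>
          if m * -n == constant && m + -n == middle_coef then some (m, -n) else none))
    else
      ffpScan (PySem.List.pyRange 1 (|constant| + 1) 1) (fun m =>
        ffpScan (PySem.List.pyRange 1 (|constant| + 1) 1) (fun n =>
          if -m * n == constant && -m + n == middle_coef then some (-m, n) else none))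

-- ===== PORT B =====
-- B's loop body at m: compute the partner n, check sign and product, emit the signed pair
def ffpAltBody (middle_coef : Int) (constant : Int) (C : Int) (B : Int) (m : Int) : Option (Int × Int) :=
  let n : Int := if constant > 0 then B - m else m - B
  if n ≥ 1 && m * n == C then
    let sm : Int := if middle_coef > 0 then 1 else -1
    let sn : Int := if constant > 0 then sm else -sm
    some (sm * m, sn * n)
  else none

-- B's single loop over m (return the value if the body fired, else continue)
def ffpAltLoop (middle_coef : Int) (constant : Int) (C : Int) (B : Int) : List Int → Option (Int × Int)
  | [] => none
  | m :: rest =>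
    match ffpAltBody middle_coef constant C B m with
    | some r => some r
    | none => ffpAltLoop middle_coef constant C B rest

def find_factor_pair_alt (middle_coef : Int) (constant : Int) : Option (Int × Int) :=
  if constant == 0 then none
  else
    ffpAltLoop middle_coef constant (|constant|) (|middle_coef|)
      (PySem.List.pyRange 1 (|constant| + 1) 1)

-- ===== PRECONDITION & SPEC =====
def Spec_find_factor_pair (middle_coef : Int) (constant : Int) (out : Option (Int × Int)) : Prop := out = find_factor_pair_alt middle_coef constant
instance (middle_coef : Int) (constant : Int) (out : Option (Int × Int)) : Decidable (Spec_find_factor_pair middle_coef constant out) := by unfold Spec_find_factor_pair; infer_instance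

-- ===== CLAIM (what is proved, stated in full; the proofs are below) =====
def Claim_equal_find_factor_pair : Prop := ∀ (middle_coef : Int) (constant : Int), Dom_find_factor_pair middle_coef constant → Spec_find_factor_pair middle_coef constant (find_factor_pair middle_coef constant)

-- ===== LEMMAS AND PROOFS =====

-- an inner scan whose predicate pins its argument to a single candidate n0
lemma ffpScan_unique (L : List Int) (p : Int → Bool) (g : Int → Int × Int) (n0 : Int)
    (h : ∀ n, p n = true → n = n0) :
    ffpScan L (fun n => if p n then some (g n) else none)
      = if n0 ∈ L ∧ p n0 = true then some (g n0) else none := by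
  induction L with
  | nil => simp [ffpScan]
  | cons x rest ih =>
    by_cases hx : p x = true
    · have : x = n0 := h x hx
      subst this
      simp [ffpScan, hx]
    · simp only [ffpScan, hx, Bool.false_eq_true, if_false]
      rw [ih]
      by_cases hp : p n0 = true
      · have hne : n0 ≠ x := fun he => hx (he ▸ hp)
        simp [hp, List.mem_cons, hne]
      · simp [hp]

-- pointwise-equal bodies give equal scans
lemma ffpScan_congr (L : List Int) (f g : Int → Option (Int × Int))
    (h : ∀ m ∈ L, f m = g m) : ffpScan L f = ffpScan L g := by
  induction L with
  | nil => rfl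
  | cons x rest ih =>
    simp only [ffpScan, h x (List.mem_cons_self)]
    cases g x with
    | some r => rfl
    | none => exact ih (fun m hm => h m (List.mem_cons_of_mem _ hm))

-- B's loop is the scan of its body
lemma ffpAltLoop_eq_scan (middle_coef constant C B : Int) (L : List Int) :
    ffpAltLoop middle_coef constant C B L = ffpScan L (ffpAltBody middle_coef constant C B) := by
  induction L with
  | nil => rfl
  | cons x rest ih =>
    simp only [ffpAltLoop, ffpScan]
    cases ffpAltBody middle_coef constant C B x with
    | some r => rfl
    | none => exact ih

theorem find_factor_pair_spec : Claim_equal_find_factor_pair := by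
  intro mc c _
  show find_factor_pair mc c = find_factor_pair_alt mc c
  by_cases hc0 : c = 0
  · subst hc0; rfl
  unfold find_factor_pair find_factor_pair_alt
  rw [ffpAltLoop_eq_scan]
  have hc0' : (c == 0) = false := by simp [hc0]
  simp only [hc0', Bool.false_eq_true, if_false]
  by_cases hcp : c > 0
  · have habs : |c| = c := abs_of_pos hcp
    by_cases hbp : mc > 0
    · -- both positive
      have habsb : |mc| = mc := abs_of_pos hbp
      simp only [hcp, hbp, if_true]
      apply ffpScan_congr
      intro m hm
      have hmr := (PySem.List.mem_pyRange_one).1 hm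
      rw [ffpScan_unique _ _ _ (mc - m)
            (by intro n hn; simp only [Bool.and_eq_true, beq_iff_eq] at hn; omega)]
      simp only [ffpAltBody, habs, habsb, hcp, hbp, if_true,
        PySem.List.mem_pyRange_one, Bool.and_eq_true, beq_iff_eq, decide_eq_true_eq,
        ge_iff_le, one_mul]
      have hsum : m + (mc - m) = mc := by omega
      simp only [hsum, and_true]
      have hub : 1 ≤ mc - m → mc - m ≤ m * (mc - m) :=
        fun h => le_mul_of_one_le_left (by omega) (by omega)
      generalize hk : m * (mc - m) = k at *
      split_ifs with h1 h2 h2 <;> first | rfl | omega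
    · -- both negative
      have habsb : |mc| = -mc := abs_of_nonpos (by omega)
      simp only [hcp, hbp, if_true, if_false]
      apply ffpScan_congr
      intro m hm
      have hmr := (PySem.List.mem_pyRange_one).1 hm
      rw [ffpScan_unique _ _ _ (-mc - m)
            (by intro n hn; simp only [Bool.and_eq_true, beq_iff_eq] at hn; omega)]
      simp only [ffpAltBody, habs, habsb, hcp, hbp, if_true, if_false,
        PySem.List.mem_pyRange_one, Bool.and_eq_true, beq_iff_eq, decide_eq_true_eq,
        ge_iff_le, neg_one_mul]
      have hsum : -m + -(-mc - m) = mc := by omega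
      simp only [hsum, and_true]
      have hub : 1 ≤ -mc - m → -mc - m ≤ m * (-mc - m) :=
        fun h => le_mul_of_one_le_left (by omega) (by omega)
      generalize hk : m * (-mc - m) = k at *
      split_ifs with h1 h2 h2 <;> first | rfl | omega
  · -- constant < 0
    have hcn : c < 0 := by omega
    have habs : |c| = -c := abs_of_neg hcn
    by_cases hbp : mc > 0
    · -- larger factor positive
      have habsb : |mc| = mc := abs_of_pos hbp
      simp only [hcp, hbp, if_true, if_false]
      apply ffpScan_congr
      intro m hm
      have hmr := (PySem.List.mem_pyRange_one).1 hm
      rw [ffpScan_unique _ _ _ (m - mc)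
            (by intro n hn; simp only [Bool.and_eq_true, beq_iff_eq] at hn; omega)]
      simp only [ffpAltBody, habs, habsb, hcp, hbp, if_true, if_false,
        PySem.List.mem_pyRange_one, Bool.and_eq_true, beq_iff_eq, decide_eq_true_eq,
        ge_iff_le, one_mul, neg_one_mul, mul_neg, neg_eq_iff_eq_neg]
      have hsum : m + -(m - mc) = mc := by omega
      simp only [hsum, and_true]
      have hub : 1 ≤ m - mc → m - mc ≤ m * (m - mc) :=
        fun h => le_mul_of_one_le_left (by omega) (by omega)
      generalize hk : m * (m - mc) = k at *
      split_ifs with h1 h2 h2 <;> first | rfl | omega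
    · -- larger factor negative
      have habsb : |mc| = -mc := abs_of_nonpos (by omega)
      simp only [hcp, hbp, if_false]
      apply ffpScan_congr
      intro m hm
      have hmr := (PySem.List.mem_pyRange_one).1 hm
      rw [ffpScan_unique _ _ _ (m + mc)
            (by intro n hn; simp only [Bool.and_eq_true, beq_iff_eq] at hn; omega)]
      simp only [ffpAltBody, habs, habsb, hcp, hbp, if_false,
        PySem.List.mem_pyRange_one, Bool.and_eq_true, beq_iff_eq, decide_eq_true_eq,
        ge_iff_le, one_mul, neg_neg, neg_mul, neg_eq_iff_eq_neg]
      have hsum : -m + (m + mc) = mc := by omega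
      simp only [hsum, and_true]
      have hub : 1 ≤ m + mc → m + mc ≤ m * (m + mc) :=
        fun h => le_mul_of_one_le_left (by omega) (by omega)
      have hsub : m - -mc = m + mc := by omega
      simp only [hsub]
      generalize hk : m * (m + mc) = k at *
      split_ifs with h1 h2 h2 <;> first | rfl | omega
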